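-- pv_equiv track=rewrite | github.com/samogden/helpful-scripts | misc/break_into_files.py | process_codeblocks
-- ===== SOURCE A (Python) =====
-- def process_codeblocks(text):
--   lines = []
--   in_codeblock = False
--   for i, line in enumerate(text.split('\n')):
--     if line.startswith('```'):
--       if not in_codeblock:
--         in_codeblock = True
--         lines.append('\\begin{verbatim}')
--       else:
--         in_codeblock = False
--         lines.append('\\end{verbatim}')
--       continue
--     lines.append(line)
--
--   return '\n'.join(lines)
-- ===== SOURCE B (Python) =====
-- def process_codeblocks(text):
--   lines = text.split('\n')
--   fence_positions = [i for i, line in enumerate(lines) if line.startswith('```')]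
--   for ordinal, pos in enumerate(fence_positions):
--     lines[pos] = '\\begin{verbatim}' if ordinal % 2 == 0 else '\\end{verbatim}'
--   return '\n'.join(lines)
-- ===== Notes on version B (the rewrite author's own statement) =====
-- stated objective: alternative
-- what changed: Replaces the stateful boolean-toggle accumulator scan with an index pass that first collects the positions of all fence lines and then overwrites each in place by its ordinal parity.
import Mathlib
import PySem

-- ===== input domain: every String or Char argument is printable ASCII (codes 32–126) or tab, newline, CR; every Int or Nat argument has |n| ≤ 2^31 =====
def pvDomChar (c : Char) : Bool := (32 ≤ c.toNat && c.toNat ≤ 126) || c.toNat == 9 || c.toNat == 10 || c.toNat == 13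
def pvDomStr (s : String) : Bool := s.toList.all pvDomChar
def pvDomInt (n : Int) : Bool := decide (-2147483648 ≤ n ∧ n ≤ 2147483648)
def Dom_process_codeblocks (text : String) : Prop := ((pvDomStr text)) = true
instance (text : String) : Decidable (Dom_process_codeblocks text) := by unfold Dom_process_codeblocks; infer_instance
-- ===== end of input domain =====

-- B replaces A's stateful boolean-toggle scan by an index pass: collect the positions of all
-- fence lines, then overwrite each collected position in place by its ordinal parity (alternative decomposition).


-- ===== PORT A =====
-- text.split('\n') with the literal nonempty separator: split? is some here; getD only totalizes.
def process_codeblocks (text : String) : String :=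
  let st := ((PySem.Str.split? text "\n").getD []).foldl
    (fun (st : List String × Bool) line =>
      if PySem.Str.startswith line "```" then
        if !st.2 then (st.1 ++ ["\\begin{verbatim}"], true)
        else (st.1 ++ ["\\end{verbatim}"], false)
      else (st.1 ++ [line], st.2))
    ([], false)
  PySem.Str.join "\n" st.1

-- ===== PORT B =====
def process_codeblocks_alt (text : String) : String :=
  let lines := (PySem.Str.split? text "\n").getD []
  let fencePositions := (PySem.List.enumerate lines).foldl
    (fun acc p => if PySem.Str.startswith p.2 "```" then acc ++ [p.1] else acc) []
  let lines2 := (PySem.List.enumerate fencePositions).foldl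
    (fun ls p => ls.set p.2.toNat
      (if PySem.Int.mod p.1 2 == 0 then "\\begin{verbatim}" else "\\end{verbatim}")) lines
  PySem.Str.join "\n" lines2

-- ===== PRECONDITION & SPEC =====
def Spec_process_codeblocks (text : String) (out : String) : Prop := out = process_codeblocks_alt text
instance (text : String) (out : String) : Decidable (Spec_process_codeblocks text out) := by unfold Spec_process_codeblocks; infer_instance

-- ===== CLAIM (what is proved, stated in full; the proofs are below) =====
def Claim_equal_process_codeblocks : Prop := ∀ (text : String), Dom_process_codeblocks text → Spec_process_codeblocks text (process_codeblocks text)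

-- ===== LEMMAS AND PROOFS =====

-- common recursive specification: rewrite lines, k = number of fence lines already seen
def pvRepl (k : Nat) : String :=
  if k % 2 = 0 then "\\begin{verbatim}" else "\\end{verbatim}"

def pvApply (k : Nat) : List String → List String
  | [] => []
  | l :: r =>
      if PySem.Str.startswith l "```" then pvRepl k :: pvApply (k + 1) r
      else l :: pvApply k r

-- positions (from offset s) of the fence lines
def pvFpos (s : Int) : List String → List Int
  | [] => []
  | l :: r =>
      if PySem.Str.startswith l "```" then s :: pvFpos (s + 1) r
      else pvFpos (s + 1) r

lemma pvFpos_nonneg (ls : List String) (s : Int) (hs : 0 ≤ s) :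
    ∀ p ∈ pvFpos s ls, 0 ≤ p := by
  induction ls generalizing s with
  | nil => simp [pvFpos]
  | cons l r ih =>
      intro p hp
      simp only [pvFpos] at hp
      split at hp
      · rcases List.mem_cons.mp hp with h | h
        · omega
        · exact ih (s + 1) (by omega) p h
      · exact ih (s + 1) (by omega) p hp

lemma pvFpos_shift (ls : List String) (s : Int) :
    pvFpos (s + 1) ls = (pvFpos s ls).map (· + 1) := by
  induction ls generalizing s with
  | nil => simp [pvFpos]
  | cons l r ih =>
      simp only [pvFpos]
      split
      · simp [ih (s + 1)]
      · exact ih (s + 1)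

-- A's fold computes pvApply
lemma pvA_fold (ls : List String) (acc : List String) (k : Nat) :
    (ls.foldl
      (fun (st : List String × Bool) line =>
        if PySem.Str.startswith line "```" then
          if !st.2 then (st.1 ++ ["\\begin{verbatim}"], true)
          else (st.1 ++ ["\\end{verbatim}"], false)
        else (st.1 ++ [line], st.2))
      (acc, decide (k % 2 = 1))).1 = acc ++ pvApply k ls := by
  induction ls generalizing acc k with
  | nil => simp [pvApply]
  | cons l r ih =>
      simp only [List.foldl_cons, pvApply]
      by_cases hf : PySem.Str.startswith l "```"
      · simp only [hf, if_true]
        rcases Nat.even_or_odd k with hk | hk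
        · have h0 : k % 2 = 0 := Nat.even_iff.mp hk
          have hb : (decide (k % 2 = 1)) = false := by simp [h0]
          rw [hb]
          simp only [Bool.not_false, if_true]
          have hIH := ih (acc ++ ["\\begin{verbatim}"]) (k + 1)
          rw [show (decide ((k+1) % 2 = 1)) = true by simp; omega] at hIH
          rw [hIH]
          simp [pvRepl, h0]
        · have h0 : k % 2 = 1 := Nat.odd_iff.mp hk
          have hb : (decide (k % 2 = 1)) = true := by simp [h0]
          rw [hb]
          simp only [Bool.not_true, Bool.false_eq_true, if_false]
          have hIH := ih (acc ++ ["\\end{verbatim}"]) (k + 1)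
          rw [show (decide ((k+1) % 2 = 1)) = false by simp; omega] at hIH
          rw [hIH]
          simp [pvRepl, h0]
      · simp only [hf, Bool.false_eq_true, if_false]
        rw [ih (acc ++ [l]) k]
        simp

-- B's first fold computes pvFpos
lemma pvB_positions (ls : List String) (s : Int) (acc : List Int) :
    (PySem.List.enumerate ls s).foldl
      (fun acc p => if PySem.Str.startswith p.2 "```" then acc ++ [p.1] else acc) acc
    = acc ++ pvFpos s ls := by
  induction ls generalizing s acc with
  | nil => simp [PySem.List.enumerate_nil, pvFpos]
  | cons l r ih =>
      rw [PySem.List.enumerate_cons]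
      simp only [List.foldl_cons, pvFpos]
      by_cases hf : PySem.Str.startswith l "```"
      · simp only [hf, if_true]
        rw [ih (s + 1) (acc ++ [s])]
        simp
      · simp only [hf]
        exact ih (s + 1) acc

-- shifting all positions by one skips the head of the list being updated
lemma pvB_set_shift (ps : List Int) (k : Int) (x : String) (rest : List String)
    (hps : ∀ p ∈ ps, 0 ≤ p) :
    (PySem.List.enumerate (ps.map (· + 1)) k).foldl
      (fun ls p => ls.set p.2.toNat
        (if PySem.Int.mod p.1 2 == 0 then "\\begin{verbatim}" else "\\end{verbatim}")) (x :: rest)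
    = x :: (PySem.List.enumerate ps k).foldl
      (fun ls p => ls.set p.2.toNat
        (if PySem.Int.mod p.1 2 == 0 then "\\begin{verbatim}" else "\\end{verbatim}")) rest := by
  induction ps generalizing k rest with
  | nil => simp [PySem.List.enumerate_nil]
  | cons p ps ih =>
      simp only [List.map_cons]
      rw [PySem.List.enumerate_cons, PySem.List.enumerate_cons]
      simp only [List.foldl_cons]
      have hp : 0 ≤ p := hps p (List.mem_cons_self ..)
      have hnat : (p + 1).toNat = p.toNat + 1 := by omega
      rw [hnat]
      simp only [List.set_cons_succ]
      exact ih (k + 1) _ (fun q hq => hps q (List.mem_cons_of_mem _ hq))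

-- B's second fold computes pvApply
lemma pvB_set (ls : List String) (k : Nat) :
    (PySem.List.enumerate (pvFpos 0 ls) (k : Int)).foldl
      (fun ls p => ls.set p.2.toNat
        (if PySem.Int.mod p.1 2 == 0 then "\\begin{verbatim}" else "\\end{verbatim}")) ls
    = pvApply k ls := by
  induction ls generalizing k with
  | nil => simp [pvFpos, PySem.List.enumerate_nil, pvApply]
  | cons l r ih =>
      simp only [pvFpos, pvApply]
      have hshift : pvFpos (0 + 1) r = (pvFpos 0 r).map (· + 1) := pvFpos_shift r 0
      by_cases hf : PySem.Str.startswith l "```"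
      · simp only [hf, if_true]
        rw [PySem.List.enumerate_cons]
        simp only [List.foldl_cons, Int.toNat_zero, List.set_cons_zero]
        have hmod : (PySem.Int.mod (k : Int) 2 == 0) = decide (k % 2 = 0) := by
          rw [show ((2:Int) = ((2:Nat):Int)) by norm_num, PySem.Int.mod_natCast]
          cases Nat.decEq (k % 2) 0 with
          | isTrue h => simp [h]
          | isFalse h => simp [h]; omega
        rw [hmod]
        have hhead :
            (if decide (k % 2 = 0) then "\\begin{verbatim}" else "\\end{verbatim}") = pvRepl k := by
          simp [pvRepl]
        rw [hhead, hshift,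
            pvB_set_shift (pvFpos 0 r) ((k : Int) + 1) (pvRepl k) r
              (pvFpos_nonneg r 0 le_rfl)]
        rw [show ((k : Int) + 1) = (((k + 1 : Nat)) : Int) by push_cast; ring]
        rw [ih (k + 1)]
      · simp only [hf, Bool.false_eq_true, if_false]
        rw [hshift,
            pvB_set_shift (pvFpos 0 r) (k : Int) l r (pvFpos_nonneg r 0 le_rfl)]
        rw [ih k]

-- ===== VERDICT (by name: the statement is the Claim_ definition above) =====
theorem process_codeblocks_spec : Claim_equal_process_codeblocks := by
  intro text _
  unfold Spec_process_codeblocks process_codeblocks process_codeblocks_alt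
  dsimp only
  generalize (PySem.Str.split? text "\n").getD [] = lines
  congr 1
  have hA := pvA_fold lines [] 0
  rw [show (decide ((0:Nat) % 2 = 1)) = false by decide] at hA
  rw [hA]
  rw [pvB_positions lines 0 []]
  simp only [List.nil_append]
  have hB := pvB_set lines 0
  rw [show (((0:Nat)):Int) = (0:Int) by norm_num] at hB
  rw [hB]
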